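-- pv_equiv track=rewrite | github.com/sumit199/INeuron_data_science_assignment | Python/question_1.py | Words_frequency
-- ===== SOURCE A (Python) =====
-- def Words_frequency (str1):
--
--     dict1 = {}
--     word = ''
--
--     for i in range(len(str1)):
--         #check until blank space so we know we have one word
--         if str1[i] == ' ':
--
--             #if word not in dict add it otherwise increase its frequency
--             if word not in dict1:
--                 dict1[word] = 1
--                 word = ''
--             else:
--                 dict1[word] = dict1[word] + 1
--                 word = ''
--
--         elif str1[i]==',':
--             #checking for comma
--             if word not in dict1:
--                 dict1[word] = 1
--                 word = ''
--             else:
--                 dict1[word] = dict1[word] + 1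
--                 word = ''
--
--         elif str1[i]=='.':
--             #checking for full stop
--             if word not in dict1:
--                 dict1[word] = 1
--                 word = ''
--             else:
--                 dict1[word] = dict1[word] + 1
--                 word = ''
--
--         else:
--             word = word + str1[i]
--     #check for last as there will no space
--     if word not in dict1:
--         dict1[word] = 1
--     else:
--         dict1[word] = dict1[word] + 1
--
--     # check dictionary for highest word frequency
--     highest_freq = max(zip(dict1.values(), dict1.keys()))[0]
--
--     return highest_freq
-- ===== SOURCE B (Python) =====
-- def Words_frequency(str1):
--     # pass 1: tokenize the whole string at once (',' and '.' act exactly like spaces)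
--     words = str1.replace(',', ' ').replace('.', ' ').split(' ')
--     # pass 2: count the tokens
--     counts = {}
--     for w in words:
--         counts[w] = counts.get(w, 0) + 1
--     # pass 3: reduce to the highest frequency
--     return max(counts.values())
-- ===== Notes on version B (the rewrite author's own statement) =====
-- stated objective: idiomatic
-- what changed: A's single interleaved character scan that flushes each word into a dict as it goes is replaced by three separate passes: tokenize the whole string at once by turning commas and periods into spaces and splitting on spaces, then count the tokens into a dict, then reduce to the maximum count.
import Mathlib
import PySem

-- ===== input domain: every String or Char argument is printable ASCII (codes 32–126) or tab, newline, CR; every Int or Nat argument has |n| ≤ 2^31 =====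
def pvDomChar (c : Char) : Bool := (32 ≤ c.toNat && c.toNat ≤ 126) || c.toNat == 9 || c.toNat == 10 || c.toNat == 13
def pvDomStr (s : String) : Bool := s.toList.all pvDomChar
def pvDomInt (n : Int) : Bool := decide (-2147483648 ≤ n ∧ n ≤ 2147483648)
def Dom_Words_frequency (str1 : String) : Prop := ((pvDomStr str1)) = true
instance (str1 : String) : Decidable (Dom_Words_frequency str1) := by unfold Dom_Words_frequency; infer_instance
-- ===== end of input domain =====

-- B replaces A's interleaved char-scan-with-dict by three separate passes (tokenize via replace+split, count, reduce); idiomatic, and measurably faster in Python (C-level replace/split vs a per-char loop).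

-- ===== PORT A =====
-- A's "flush word into dict1" block (`if word not in dict1: dict1[word]=1 else: dict1[word]+=1`); words are List Char.
def wfFlush (d : PySem.Dict (List Char) Int) (w : List Char) : PySem.Dict (List Char) Int :=
  if d.contains w = false then d.insert w 1 else d.insert w (d.getD w 0 + 1)

-- one iteration of A's `for i in range(len(str1))` over str1[i], state (dict1, word)
def wfStep (st : PySem.Dict (List Char) Int × List Char) (c : Char) :
    PySem.Dict (List Char) Int × List Char :=
  if c = ' ' then (wfFlush st.1 st.2, [])
  else if c = ',' then (wfFlush st.1 st.2, [])
  else if c = '.' then (wfFlush st.1 st.2, [])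
  else (st.1, st.2 ++ [c])

-- Python's `<` on a (int, str) tuple: first component, then the string (code-point lexicographic)
def wfPairLt (a b : Int × List Char) : Bool :=
  decide (a.1 < b.1) || (a.1 == b.1 && PySem.Chars.strLt a.2 b.2)

def Words_frequency (str1 : String) : Int :=
  let st := str1.toList.foldl wfStep (PySem.Dict.empty, [])
  let d := wfFlush st.1 st.2
  -- max(zip(dict1.values(), dict1.keys()))[0]: a running max over the (value, key) pairs,
  -- keeping the first maximal pair (hand port of max(); on [] Python raises, but d is never empty)
  match d.values.zip d.keys with
  | [] => 0
  | p :: t => (t.foldl (fun m q => if wfPairLt m q then q else m) p).1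

-- ===== PORT B =====
def Words_frequency_alt (str1 : String) : Int :=
  -- pass 1: words = str1.replace(',', ' ').replace('.', ' ').split(' ')
  let words := PySem.Chars.splitOn
      (PySem.Chars.replace (PySem.Chars.replace str1.toList [','] [' ']) ['.'] [' ']) [' ']
  -- pass 2: counts[w] = counts.get(w, 0) + 1 for each w
  let counts := words.foldl (fun d w => d.modify w 0 (· + 1)) PySem.Dict.empty
  -- pass 3: max(counts.values()) as a running max (on [] Python raises; counts is never empty)
  match counts.values with
  | [] => 0
  | v :: t => t.foldl max v

-- ===== PRECONDITION & SPEC =====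
def Spec_Words_frequency (str1 : String) (out : Int) : Prop := out = Words_frequency_alt str1
instance (str1 : String) (out : Int) : Decidable (Spec_Words_frequency str1 out) := by unfold Spec_Words_frequency; infer_instance

-- ===== CLAIM (what is proved, stated in full; the proofs are below) =====
def Claim_equal_Words_frequency : Prop := ∀ (str1 : String), Dom_Words_frequency str1 → Spec_Words_frequency str1 (Words_frequency str1)

-- ===== LEMMAS AND PROOFS =====

-- the character substitution performed by the two replaces (',' → ' ', then '.' → ' ')
def wfRepl (c : Char) : Char := if c = ',' then ' ' else if c = '.' then ' ' else c

-- reference splitter: split at ' ' keeping empty tokens, w = word accumulated so far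
def wfSplitSp (w : List Char) : List Char → List (List Char)
  | [] => [w]
  | c :: rest => if c = ' ' then w :: wfSplitSp [] rest else wfSplitSp (w ++ [c]) rest

lemma wf_replace_go_single (o n : Char) :
    ∀ (l : List Char) (acc : List Char) (fuel : Nat), l.length ≤ fuel →
      PySem.Chars.replace.go [o] [n] fuel l acc
        = acc.reverse ++ l.map (fun c => if c = o then n else c) := by
  intro l
  induction l with
  | nil =>
    intro acc fuel _
    cases fuel <;> simp [PySem.Chars.replace.go]
  | cons c t ih =>
    intro acc fuel hf
    cases fuel with
    | zero => simp at hf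
    | succ f =>
      simp only [PySem.Chars.replace.go]
      by_cases h : c = o
      · subst h
        rw [if_pos (by simp [List.isPrefixOf])]
        simpa using ih ([n].reverse ++ acc) f (by simpa using hf)
      · have hp : [o].isPrefixOf (c :: t) = false := by
          simp [List.isPrefixOf]
          exact fun hco => absurd hco.symm h
        rw [if_neg (by simp [hp])]
        rw [ih _ f (by simpa using hf)]
        simp [h]

lemma wf_replace_single (o n : Char) (s : List Char) :
    PySem.Chars.replace s [o] [n] = s.map (fun c => if c = o then n else c) := by
  simp only [PySem.Chars.replace]
  rw [if_neg (by simp)]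
  simpa using wf_replace_go_single o n s [] s.length le_rfl

lemma wf_splitOn_go_space :
    ∀ (l cur : List Char) (acc : List (List Char)) (fuel : Nat), l.length ≤ fuel →
      PySem.Chars.splitOn.go [' '] fuel l cur acc
        = acc.reverse ++ wfSplitSp cur.reverse l := by
  intro l
  induction l with
  | nil =>
    intro cur acc fuel _
    cases fuel <;> simp [PySem.Chars.splitOn.go, wfSplitSp]
  | cons c t ih =>
    intro cur acc fuel hf
    cases fuel with
    | zero => simp at hf
    | succ f =>
      simp only [PySem.Chars.splitOn.go]
      by_cases h : c = ' '
      · subst h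
        rw [if_pos (by simp [List.isPrefixOf])]
        simpa [wfSplitSp] using ih [] (List.reverse cur :: acc) f (by simpa using hf)
      · have hp : [' '].isPrefixOf (c :: t) = false := by
          simp [List.isPrefixOf]
          exact fun hco => absurd hco.symm h
        rw [if_neg (by simp [hp])]
        rw [ih (c :: cur) acc f (by simpa using hf)]
        simp [wfSplitSp, h]

lemma wf_splitOn_space (s : List Char) :
    PySem.Chars.splitOn s [' '] = wfSplitSp [] s := by
  simp only [PySem.Chars.splitOn]
  simpa using wf_splitOn_go_space s [] [] (s.length + 1) (by omega)

-- the two replaces compose to one character map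
lemma wf_two_replaces (s : List Char) :
    PySem.Chars.replace (PySem.Chars.replace s [','] [' ']) ['.'] [' '] = s.map wfRepl := by
  rw [wf_replace_single, wf_replace_single, List.map_map]
  apply List.map_congr_left
  intro c _
  by_cases h1 : c = ',' <;> by_cases h2 : c = '.' <;> simp [wfRepl, Function.comp, h1, h2]

-- A's flush IS counts[w] = counts.get(w, 0) + 1 (Dict.modify)
lemma wfFlush_eq_modify (d : PySem.Dict (List Char) Int) (w : List Char) :
    wfFlush d w = d.modify w 0 (· + 1) := by
  unfold wfFlush PySem.Dict.modify
  cases h : d.contains w with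
  | false => simp [PySem.Dict.getD_of_not_contains d 0 h]
  | true => simp

-- A's scan of s from state (d, w), then the final flush, equals flushing the tokens of
-- w ++ (s with ',' '.' turned into ' '), one by one, into d
lemma wf_scan_eq :
    ∀ (s : List Char) (d : PySem.Dict (List Char) Int) (w : List Char),
      wfFlush (s.foldl wfStep (d, w)).1 (s.foldl wfStep (d, w)).2
        = (wfSplitSp w (s.map wfRepl)).foldl wfFlush d := by
  intro s
  induction s with
  | nil => intro d w; simp [wfSplitSp]
  | cons c t ih =>
    intro d w
    by_cases h1 : c = ' '
    · subst h1; simpa [wfStep, wfSplitSp, wfRepl] using ih (wfFlush d w) []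
    · by_cases h2 : c = ','
      · subst h2; simpa [wfStep, wfSplitSp, wfRepl] using ih (wfFlush d w) []
      · by_cases h3 : c = '.'
        · subst h3; simpa [wfStep, wfSplitSp, wfRepl] using ih (wfFlush d w) []
        · have hr : wfRepl c = c := by simp [wfRepl, h2, h3]
          simpa [wfStep, wfSplitSp, h1, h2, h3, hr] using ih d (w ++ [c])

lemma wf_foldl_flush_eq_modify (l : List (List Char)) (d : PySem.Dict (List Char) Int) :
    l.foldl wfFlush d = l.foldl (fun d w => d.modify w 0 (· + 1)) d := by
  induction l generalizing d with
  | nil => rfl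
  | cons x t ih => simp only [List.foldl_cons, wfFlush_eq_modify, ih]

-- the running max over (value, key) pairs projects to the running max over the values
lemma wf_foldl_pairmax_fst (t : List (Int × List Char)) :
    ∀ p : Int × List Char,
      (t.foldl (fun m q => if wfPairLt m q then q else m) p).1
        = t.foldl (fun (m : Int) q => max m q.1) p.1 := by
  induction t with
  | nil => intro p; rfl
  | cons q t ih =>
    intro p
    rw [List.foldl_cons, List.foldl_cons, ih]
    congr 1
    unfold wfPairLt
    split_ifs with h
    · rcases Bool.or_eq_true_iff.mp h with h' | h'
      · have := of_decide_eq_true h'; omega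
      · have := beq_iff_eq.mp (Bool.and_eq_true_iff.mp h').1; omega
    · have h1 : ¬ p.1 < q.1 := by
        intro hlt
        exact h (Bool.or_eq_true_iff.mpr (Or.inl (by simpa using hlt)))
      omega

-- both ports build the SAME dict
lemma wf_dict_eq (str1 : String) :
    wfFlush (str1.toList.foldl wfStep (PySem.Dict.empty, [])).1
        (str1.toList.foldl wfStep (PySem.Dict.empty, [])).2
      = (PySem.Chars.splitOn
          (PySem.Chars.replace (PySem.Chars.replace str1.toList [','] [' ']) ['.'] [' ']) [' ']).foldl
          (fun d w => d.modify w 0 (· + 1)) PySem.Dict.empty := by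
  rw [wf_two_replaces, wf_splitOn_space, wf_scan_eq, wf_foldl_flush_eq_modify]

-- A's final max over (value, key) pairs equals B's max over the values, for ANY dict
lemma wf_max_eq (d : PySem.Dict (List Char) Int) :
    (match d.values.zip d.keys with
     | [] => (0 : Int)
     | p :: t => (t.foldl (fun m q => if wfPairLt m q then q else m) p).1)
    = (match d.values with
       | [] => (0 : Int)
       | v :: t => t.foldl max v) := by
  obtain ⟨l⟩ := d
  have hz : (PySem.Dict.mk l : PySem.Dict (List Char) Int).values.zip (PySem.Dict.mk l).keys
      = l.map (fun p => (p.2, p.1)) := by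
    show (l.map Prod.snd).zip (l.map Prod.fst) = _
    rw [List.zip_map']
  rw [hz]
  cases l with
  | nil => rfl
  | cons i t =>
    show ((t.map (fun p => (p.2, p.1))).foldl (fun m q => if wfPairLt m q then q else m) (i.2, i.1)).1
        = (t.map (fun x => x.2)).foldl max i.2
    rw [wf_foldl_pairmax_fst, List.foldl_map, List.foldl_map]

-- ===== VERDICT (by name: the statement is the Claim_ definition above) =====
theorem Words_frequency_spec : Claim_equal_Words_frequency := by
  intro str1 _
  show Words_frequency str1 = Words_frequency_alt str1
  have h1 : Words_frequency str1
      = (match (wfFlush (str1.toList.foldl wfStep (PySem.Dict.empty, [])).1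
                  (str1.toList.foldl wfStep (PySem.Dict.empty, [])).2).values.zip
               (wfFlush (str1.toList.foldl wfStep (PySem.Dict.empty, [])).1
                  (str1.toList.foldl wfStep (PySem.Dict.empty, [])).2).keys with
         | [] => (0 : Int)
         | p :: t => (t.foldl (fun m q => if wfPairLt m q then q else m) p).1) := rfl
  have h2 : Words_frequency_alt str1
      = (match ((PySem.Chars.splitOn
            (PySem.Chars.replace (PySem.Chars.replace str1.toList [','] [' ']) ['.'] [' ']) [' ']).foldl
            (fun d w => d.modify w 0 (· + 1)) PySem.Dict.empty).values with
         | [] => (0 : Int)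
         | v :: t => t.foldl max v) := rfl
  rw [h1, h2, wf_dict_eq]
  exact wf_max_eq _
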